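-- pv_equiv track=rewrite | github.com/HubSev/eml_forensic_suite | src/eml_forensic_suite/core/scoring.py | _domain_in_list
-- ===== SOURCE A (Python) =====
-- from typing import Any, Dict, List, Optional
--
-- def _domain_in_list(domain: Optional[str], patterns: set[str]) -> bool:
--     if not domain:
--         return False
--     d = domain.lower()
--     for p in patterns:
--         p = p.lower()
--         if d == p or d.endswith("." + p):
--             return True
--     return False
-- ===== SOURCE B (Python) =====
-- def _domain_in_list(domain, patterns):
--     if not domain:
--         return False
--     d = domain.lower()
--     candidates = {d}
--     for i, ch in enumerate(d):
--         if ch == '.':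
--             candidates.add(d[i + 1:])
--     return not candidates.isdisjoint(p.lower() for p in patterns)
-- ===== Notes on version B (the rewrite author's own statement) =====
-- stated objective: alternative
-- what changed: Instead of scanning every pattern with endswith, B derives from the domain the finite set of strings that could match (the domain and each suffix after a dot) and tests set disjointness with the lowered patterns.
import Mathlib
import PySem

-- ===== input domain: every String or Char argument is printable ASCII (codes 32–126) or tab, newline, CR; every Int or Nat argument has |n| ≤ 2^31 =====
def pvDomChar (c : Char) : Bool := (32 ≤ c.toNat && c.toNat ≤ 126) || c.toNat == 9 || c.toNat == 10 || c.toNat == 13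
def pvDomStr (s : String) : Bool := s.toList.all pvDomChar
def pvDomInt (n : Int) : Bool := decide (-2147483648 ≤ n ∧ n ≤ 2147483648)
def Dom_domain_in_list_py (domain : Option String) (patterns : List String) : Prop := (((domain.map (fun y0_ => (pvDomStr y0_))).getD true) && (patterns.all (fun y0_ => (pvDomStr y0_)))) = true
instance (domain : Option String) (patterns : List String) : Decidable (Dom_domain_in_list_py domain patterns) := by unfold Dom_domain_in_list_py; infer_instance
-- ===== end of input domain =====

-- B derives the candidate strings from the domain's label structure and tests set membership
-- instead of scanning every pattern with endswith; alternative decomposition, return value only.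

-- ===== PORT A =====
-- the for-loop with early return over patterns
def pvLoopA (d : List Char) : List String → Bool
  | [] => false
  | p :: rest =>
    let pl := PySem.Chars.lower p.toList
    if d == pl || PySem.Chars.endswith d ('.' :: pl) then true else pvLoopA d rest

def domain_in_list_py (domain : Option String) (patterns : List String) : Bool :=
  match domain with
  | none => false
  | some s =>
    if s.toList == [] then false
    else
      let d := PySem.Chars.lower s.toList
      pvLoopA d patterns

-- ===== PORT B =====
-- candidates added by the for-loop over d: d[i+1:] for each i with d[i] = '.'
def pvSuffixesAfterDots : List Char → List (List Char)
  | [] => []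
  | c :: rest => if c == '.' then rest :: pvSuffixesAfterDots rest else pvSuffixesAfterDots rest

def domain_in_list_py_alt (domain : Option String) (patterns : List String) : Bool :=
  match domain with
  | none => false
  | some s =>
    if s.toList == [] then false
    else
      let d := PySem.Chars.lower s.toList
      let candidates := d :: pvSuffixesAfterDots d
      -- not candidates.isdisjoint(p.lower() for p in patterns)
      patterns.any (fun p => candidates.contains (PySem.Chars.lower p.toList))

-- ===== PRECONDITION & SPEC =====
def Spec_domain_in_list_py (domain : Option String) (patterns : List String) (out : Bool) : Prop := out = domain_in_list_py_alt domain patterns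
instance (domain : Option String) (patterns : List String) (out : Bool) : Decidable (Spec_domain_in_list_py domain patterns out) := by unfold Spec_domain_in_list_py; infer_instance

-- ===== CLAIM (what is proved, stated in full; the proofs are below) =====
def Claim_equal_domain_in_list_py : Prop := ∀ (domain : Option String) (patterns : List String), Dom_domain_in_list_py domain patterns → Spec_domain_in_list_py domain patterns (domain_in_list_py domain patterns)

-- ===== LEMMAS AND PROOFS =====
lemma mem_pvSuffixesAfterDots (d pl : List Char) :
    pl ∈ pvSuffixesAfterDots d ↔ ('.' :: pl) <:+ d := by
  induction d with
  | nil => simp [pvSuffixesAfterDots]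
  | cons c rest ih =>
    by_cases hc : c = '.'
    · subst hc
      simp only [pvSuffixesAfterDots, beq_self_eq_true, if_true, List.mem_cons, ih,
        List.suffix_cons_iff, List.cons.injEq, true_and]
      try tauto
    · simp only [pvSuffixesAfterDots, beq_iff_eq, hc, if_false, ih, List.suffix_cons_iff,
        List.cons.injEq]
      tauto

lemma match_iff (d pl : List Char) :
    (d == pl || PySem.Chars.endswith d ('.' :: pl)) = (d :: pvSuffixesAfterDots d).contains pl := by
  rw [Bool.eq_iff_iff]
  simp only [List.contains_eq_mem, List.mem_cons, Bool.or_eq_true, beq_iff_eq,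
    PySem.Chars.endswith_iff, mem_pvSuffixesAfterDots, decide_eq_true_eq]
  tauto

lemma loopA_eq_any (d : List Char) (ps : List String) :
    pvLoopA d ps = ps.any (fun p => (d :: pvSuffixesAfterDots d).contains (PySem.Chars.lower p.toList)) := by
  induction ps with
  | nil => rfl
  | cons p rest ih =>
    simp only [pvLoopA, match_iff, ih, List.any_cons]
    cases h : (d :: pvSuffixesAfterDots d).contains (PySem.Chars.lower p.toList) <;> simp

-- ===== VERDICT (by name: the statement is the Claim_ definition above) =====
theorem domain_in_list_py_spec : Claim_equal_domain_in_list_py := by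
  intro domain patterns _
  unfold Spec_domain_in_list_py domain_in_list_py domain_in_list_py_alt
  match domain with
  | none => rfl
  | some s =>
    by_cases h : s.toList = []
    · simp [h]
    · simp only [h, beq_iff_eq, if_false]
      exact loopA_eq_any _ _
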